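-- pv_equiv track=rewrite | github.com/piotoor/AdventOfCode2021 | solutions.py | calculate_hrz_depth_aim_product
-- ===== SOURCE A (Python) =====
-- def calculate_hrz_depth_aim_product(data):
--     hrz, depth, aim = 0, 0, 0
--     for x in data:
--         cmd, arg = x
--
--         if cmd == "forward":
--             hrz += int(arg)
--             depth += aim * int(arg)
--         elif cmd == "up":
--             aim -= int(arg)
--         elif cmd == "down":
--             aim += int(arg)
--
--     return hrz * depth
-- ===== SOURCE B (Python) =====
-- def calculate_hrz_depth_aim_product(data):
--     data = list(data)
--     incs = [-int(arg) if cmd == "up" else (int(arg) if cmd == "down" else 0)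
--             for cmd, arg in data]
--     aims = []
--     s = 0
--     for v in incs:
--         s += v
--         aims.append(s)
--     hrz = sum(int(arg) for cmd, arg in data if cmd == "forward")
--     depth = sum(a * int(arg) for (cmd, arg), a in zip(data, aims) if cmd == "forward")
--     return hrz * depth
-- ===== Notes on version B (the rewrite author's own statement) =====
-- stated objective: alternative
-- what changed: Replaces the single interleaved stateful scan over (hrz, depth, aim) by a prefix-sum table of aim increments plus two independent filtered reductions (hrz and depth over forward commands), multiplied at the end.
import Mathlib
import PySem

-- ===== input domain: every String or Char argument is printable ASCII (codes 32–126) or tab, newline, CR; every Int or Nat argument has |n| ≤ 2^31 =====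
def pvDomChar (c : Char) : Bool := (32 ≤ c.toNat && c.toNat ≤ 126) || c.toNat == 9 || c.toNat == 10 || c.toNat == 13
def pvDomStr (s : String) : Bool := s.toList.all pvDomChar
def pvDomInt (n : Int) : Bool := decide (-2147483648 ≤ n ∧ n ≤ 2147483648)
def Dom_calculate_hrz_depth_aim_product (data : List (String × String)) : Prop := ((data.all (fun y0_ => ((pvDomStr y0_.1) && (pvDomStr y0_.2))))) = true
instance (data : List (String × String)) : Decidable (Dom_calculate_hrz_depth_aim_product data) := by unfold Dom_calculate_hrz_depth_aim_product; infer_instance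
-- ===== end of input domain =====

-- B recomputes the same answer via a prefix-sum table of aim increments plus two
-- independent filtered reductions, instead of A's single interleaved stateful scan.

-- int(arg); Pre_ guarantees the parse succeeds wherever either Python calls int()
def pvIntOf (s : String) : Int := (PySem.Int.ofStr? s).getD 0

-- ===== PORT A =====
def stepA (st : Int × Int × Int) (x : String × String) : Int × Int × Int :=
  if x.1 = "forward" then (st.1 + pvIntOf x.2, st.2.1 + st.2.2 * pvIntOf x.2, st.2.2)
  else if x.1 = "up" then (st.1, st.2.1, st.2.2 - pvIntOf x.2)
  else if x.1 = "down" then (st.1, st.2.1, st.2.2 + pvIntOf x.2)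
  else st

def calculate_hrz_depth_aim_product (data : List (String × String)) : Int :=
  let st := data.foldl stepA (0, 0, 0)
  st.1 * st.2.1

-- ===== PORT B =====
-- aim increment of one command ('up' → -int(arg), 'down' → +int(arg), else 0)
def pvInc (x : String × String) : Int :=
  if x.1 = "up" then -(pvIntOf x.2) else if x.1 = "down" then pvIntOf x.2 else 0

def calculate_hrz_depth_aim_product_alt (data : List (String × String)) : Int :=
  let incs := data.map pvInc
  let aims := (incs.foldl (fun (p : Int × List Int) v => (p.1 + v, p.2 ++ [p.1 + v])) (0, ([] : List Int))).2
  let hrz := data.foldl (fun s x => if x.1 = "forward" then s + pvIntOf x.2 else s) (0 : Int)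
  let depth := (data.zip aims).foldl (fun s p => if p.1.1 = "forward" then s + p.2 * pvIntOf p.1.2 else s) (0 : Int)
  hrz * depth

-- ===== PRECONDITION & SPEC =====
-- Pre_ excludes exactly the inputs where Python's int(arg) raises ValueError
-- (a 'forward'/'up'/'down' command whose argument is not an int literal).
def Pre_calculate_hrz_depth_aim_product (data : List (String × String)) : Prop :=
  ∀ x ∈ data, (x.1 = "forward" ∨ x.1 = "up" ∨ x.1 = "down") → (PySem.Int.ofStr? x.2).isSome
instance (data : List (String × String)) : Decidable (Pre_calculate_hrz_depth_aim_product data) := by unfold Pre_calculate_hrz_depth_aim_product; infer_instance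

def pvWitness_calculate_hrz_depth_aim_product : (List (String × String)) :=
  [("forward", "5"), ("down", "3"), ("forward", " 2 "), ("up", "+1"), ("forward", "4"), ("left", "oops")]

def Spec_calculate_hrz_depth_aim_product (data : List (String × String)) (out : Int) : Prop := out = calculate_hrz_depth_aim_product_alt data
instance (data : List (String × String)) (out : Int) : Decidable (Spec_calculate_hrz_depth_aim_product data out) := by unfold Spec_calculate_hrz_depth_aim_product; infer_instance

-- ===== CLAIM (what is proved, stated in full; the proofs are below) =====
def Claim_equal_calculate_hrz_depth_aim_product : Prop := ∀ (data : List (String × String)), Dom_calculate_hrz_depth_aim_product data → Pre_calculate_hrz_depth_aim_product data → Spec_calculate_hrz_depth_aim_product data (calculate_hrz_depth_aim_product data)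

-- ===== LEMMAS AND PROOFS =====

-- total of the 'forward' arguments
def hsum : List (String × String) → Int
  | [] => 0
  | x :: t => (if x.1 = "forward" then pvIntOf x.2 else 0) + hsum t

-- depth accumulated when starting with aim `a`
def dsum (a : Int) : List (String × String) → Int
  | [] => 0
  | x :: t => (if x.1 = "forward" then a * pvIntOf x.2 else 0) + dsum (a + pvInc x) t

-- prefix sums of `l` starting from `a` (what B's aims-loop produces)
def pfx (a : Int) : List Int → List Int
  | [] => []
  | v :: t => (a + v) :: pfx (a + v) t

lemma inc_forward (x : String × String) (h : x.1 = "forward") : pvInc x = 0 := by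
  simp [pvInc, h]

lemma foldA_eq (data : List (String × String)) : ∀ (h d a : Int),
    data.foldl stepA (h, d, a) = (h + hsum data, d + dsum a data, a + (data.map pvInc).sum) := by
  induction data with
  | nil => intro h d a; simp [hsum, dsum]
  | cons x t ih =>
    intro h d a
    simp only [List.foldl_cons, stepA, hsum, dsum, List.map_cons, List.sum_cons]
    by_cases h1 : x.1 = "forward"
    · simp [h1, pvInc, ih]; constructor <;> ring
    · by_cases h2 : x.1 = "up"
      · simp [h2, pvInc, ih]
        constructor <;> abel
      · by_cases h3 : x.1 = "down"
        · simp [h3, pvInc, ih]; ring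
        · simp [h1, h2, h3, pvInc, ih]

lemma foldAims_eq (l : List Int) : ∀ (a : Int) (acc : List Int),
    (l.foldl (fun (p : Int × List Int) v => (p.1 + v, p.2 ++ [p.1 + v])) (a, acc)).2 = acc ++ pfx a l := by
  induction l with
  | nil => intro a acc; simp [pfx]
  | cons v t ih => intro a acc; simp [pfx, ih]

lemma foldHrz_eq (data : List (String × String)) : ∀ (s : Int),
    data.foldl (fun s x => if x.1 = "forward" then s + pvIntOf x.2 else s) s = s + hsum data := by
  induction data with
  | nil => intro s; simp [hsum]
  | cons x t ih =>
    intro s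
    simp only [List.foldl_cons, hsum]
    split_ifs with h1
    · rw [ih]; ring
    · rw [ih]; ring

lemma foldDepth_eq (data : List (String × String)) : ∀ (a s : Int),
    (data.zip (pfx a (data.map pvInc))).foldl (fun s p => if p.1.1 = "forward" then s + p.2 * pvIntOf p.1.2 else s) s = s + dsum a data := by
  induction data with
  | nil => intro a s; simp [dsum]
  | cons x t ih =>
    intro a s
    simp only [List.map_cons, pfx, List.zip_cons_cons, List.foldl_cons, dsum]
    by_cases h1 : x.1 = "forward"
    · rw [inc_forward x h1]
      rw [ih]; simp [h1]; ring
    · simp [h1, ih]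

theorem agree (data : List (String × String)) :
    calculate_hrz_depth_aim_product data = calculate_hrz_depth_aim_product_alt data := by
  show (data.foldl stepA (0,0,0)).1 * (data.foldl stepA (0,0,0)).2.1 = _
  rw [foldA_eq]
  unfold calculate_hrz_depth_aim_product_alt
  simp only [foldAims_eq, foldHrz_eq, List.nil_append]
  rw [foldDepth_eq]

-- ===== VERDICT (by name: the statement is the Claim_ definition above) =====
theorem calculate_hrz_depth_aim_product_spec : Claim_equal_calculate_hrz_depth_aim_product := by
  intro data _ _
  unfold Spec_calculate_hrz_depth_aim_product
  exact agree data
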